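-- pv_equiv track=rewrite | github.com/JuanalvarezECI/OBSERVABLES-Y-MEDIDAS | libreria.py | ditancia_Vectores
-- ===== SOURCE A (Python) =====
-- def sumComplejos(a,b):
--     return (a[0]+b[0], a[1]+b[1])
--
-- def Restacomplejos(a,b):
--     return (a[0]-b[0], a[1]-b[1])
--
-- def Multicomplejos(a,b):
--     return((a[0]*b[0] - a[1]*b[1]) , (a[1]*b[0] + a[0]*b[1]))
--
-- def matriz_Conjugada(matriz1,valor):
--     if valor == 1:
--         matriz_Conjugada = [[[0,0] for j in range(len(matriz1))] for i in range(len(matriz1))]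
--         for i in range(len(matriz1)):
--             for j in range(len(matriz1)):
--                     matriz_Conjugada[i][j][0] = matriz1[i][j][0]
--                     matriz_Conjugada[i][j][1] = matriz1[i][j][1] * -1
--         return matriz_Conjugada
--     else:
--         vectorEsca = [[[0,0] for j in range(1)] for i in range(len(matriz1))]
--         for i in range(len(matriz1)):
--             for j in range(1):
--                 vectorEsca[i][j][0] = matriz1[i][0]
--                 vectorEsca[i][j][1] = matriz1[i][1] * -1
--         return vectorEsca
--
-- def ditancia_Vectores(v1,v2):
--     resta = []
--     vector = []
--     cont = [0,0]
--     for i in range(len(v1)):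
--         for j in range(1):
--             x = Restacomplejos(v1[i],v2[i])
--             resta.append(x)
--     v3 = list(matriz_Conjugada(resta,2))
--     for i in range(len(v1)):
--         for j in range(len(v1)):
--             primera = Multicomplejos(v3[j][i],resta[j])
--             vector.append(primera)
--         break
--     for i in range(len(vector)):
--         cont = sumComplejos(cont,vector[i])
--     return cont
-- ===== SOURCE B (Python) =====
-- def ditancia_Vectores(v1, v2):
--     cont = [0, 0]
--     for i in range(len(v1)):
--         dr = v1[i][0] - v2[i][0]
--         di = v1[i][1] - v2[i][1]
--         cont = (cont[0] + dr * dr + di * di, cont[1])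
--     return cont
-- ===== Notes on version B (the rewrite author's own statement) =====
-- stated objective: simpler
-- what changed: one fused accumulation loop over the index replaces A's four passes that build intermediate lists (subtraction list, conjugate wrapper matrix, complex-product list, then a summation fold).
import Mathlib
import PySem

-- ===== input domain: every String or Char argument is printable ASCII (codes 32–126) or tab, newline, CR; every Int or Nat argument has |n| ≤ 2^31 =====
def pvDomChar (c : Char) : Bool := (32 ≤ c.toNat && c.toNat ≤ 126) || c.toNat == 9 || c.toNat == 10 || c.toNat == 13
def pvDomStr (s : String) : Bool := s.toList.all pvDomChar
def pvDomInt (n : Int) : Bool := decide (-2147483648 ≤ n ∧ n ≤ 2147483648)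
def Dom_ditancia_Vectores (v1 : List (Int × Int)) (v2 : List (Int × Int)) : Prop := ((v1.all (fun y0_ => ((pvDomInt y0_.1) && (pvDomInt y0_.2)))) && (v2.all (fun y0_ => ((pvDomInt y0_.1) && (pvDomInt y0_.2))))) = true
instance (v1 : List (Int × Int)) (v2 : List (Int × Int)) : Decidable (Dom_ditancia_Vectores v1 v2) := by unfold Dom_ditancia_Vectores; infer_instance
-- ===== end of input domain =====

-- B replaces A's four list-building passes with one fused accumulation loop (objective: simpler).

-- ===== PORT A =====
def sumComplejos (a b : Int × Int) : Int × Int := (a.1 + b.1, a.2 + b.2)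

def restaComplejos (a b : Int × Int) : Int × Int := (a.1 - b.1, a.2 - b.2)

def multiComplejos (a b : Int × Int) : Int × Int :=
  (a.1 * b.1 - a.2 * b.2, a.2 * b.1 + a.1 * b.2)

-- matriz_Conjugada with valor = 2 (the only branch A uses): each entry wrapped in a singleton row
def matrizConjugada2 (m : List (Int × Int)) : List (List (Int × Int)) :=
  (List.range m.length).foldl
    (fun acc i => acc ++ [[((m.getD i (0, 0)).1, (m.getD i (0, 0)).2 * -1)]]) []

def ditancia_Vectores (v1 : List (Int × Int)) (v2 : List (Int × Int)) : Int × Int :=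
  -- resta: first pass (indices in range under Pre_, so getD is exact)
  let resta := (List.range v1.length).foldl
    (fun acc i => acc ++ [restaComplejos (v1.getD i (0, 0)) (v2.getD i (0, 0))]) []
  let v3 := matrizConjugada2 resta
  -- the outer i-loop breaks after i = 0, so only the inner j-loop at i = 0 runs
  let vector := (List.range v1.length).foldl
    (fun acc j => acc ++ [multiComplejos ((v3.getD j []).getD 0 (0, 0)) (resta.getD j (0, 0))]) []
  vector.foldl (fun cont p => sumComplejos cont p) (0, 0)

-- ===== PORT B =====
def ditancia_Vectores_alt (v1 : List (Int × Int)) (v2 : List (Int × Int)) : Int × Int :=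
  (List.range v1.length).foldl
    (fun cont i =>
      let dr := (v1.getD i (0, 0)).1 - (v2.getD i (0, 0)).1
      let di := (v1.getD i (0, 0)).2 - (v2.getD i (0, 0)).2
      (cont.1 + dr * dr + di * di, cont.2)) (0, 0)

-- ===== PRECONDITION & SPEC =====
-- Python A indexes v2[i] for i in range(len(v1)): it raises IndexError when v2 is shorter than v1
def Pre_ditancia_Vectores (v1 : List (Int × Int)) (v2 : List (Int × Int)) : Prop :=
  v1.length ≤ v2.length
instance (v1 : List (Int × Int)) (v2 : List (Int × Int)) : Decidable (Pre_ditancia_Vectores v1 v2) := by unfold Pre_ditancia_Vectores; infer_instance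

def pvWitness_ditancia_Vectores : (List (Int × Int)) × (List (Int × Int)) :=
  ([(1, 2), (3, -1)], [(0, 0), (2, 2)])

def Spec_ditancia_Vectores (v1 : List (Int × Int)) (v2 : List (Int × Int)) (out : Int × Int) : Prop := out = ditancia_Vectores_alt v1 v2
instance (v1 : List (Int × Int)) (v2 : List (Int × Int)) (out : Int × Int) : Decidable (Spec_ditancia_Vectores v1 v2 out) := by unfold Spec_ditancia_Vectores; infer_instance

-- ===== CLAIM (what is proved, stated in full; the proofs are below) =====
def Claim_equal_ditancia_Vectores : Prop := ∀ (v1 : List (Int × Int)) (v2 : List (Int × Int)), Dom_ditancia_Vectores v1 v2 → Pre_ditancia_Vectores v1 v2 → Spec_ditancia_Vectores v1 v2 (ditancia_Vectores v1 v2)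

-- ===== LEMMAS AND PROOFS =====

-- the per-index squared difference both programs accumulate
def pvSq (v1 v2 : List (Int × Int)) (i : Nat) : Int :=
  ((v1.getD i (0, 0)).1 - (v2.getD i (0, 0)).1) * ((v1.getD i (0, 0)).1 - (v2.getD i (0, 0)).1) +
  ((v1.getD i (0, 0)).2 - (v2.getD i (0, 0)).2) * ((v1.getD i (0, 0)).2 - (v2.getD i (0, 0)).2)

-- a fold that only adds into the first component, keeping the second, is a scalar fold paired with the untouched second
theorem pair_foldl (f : Nat → Int) : ∀ (l : List Nat) (a b : Int),
    l.foldl (fun c i => (c.1 + f i, c.2)) (a, b) = ((l.map f).foldl (· + ·) a, b)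
  | [], _, _ => rfl
  | x :: xs, a, b => by
    simp only [List.foldl_cons, List.map_cons]
    exact pair_foldl f xs (a + f x) b

theorem alt_char (v1 v2 : List (Int × Int)) :
    ditancia_Vectores_alt v1 v2 =
      (((List.range v1.length).map (pvSq v1 v2)).foldl (· + ·) 0, 0) := by
  unfold ditancia_Vectores_alt
  have h : (fun (cont : Int × Int) (i : Nat) =>
      (cont.1 + ((v1.getD i (0, 0)).1 - (v2.getD i (0, 0)).1) * ((v1.getD i (0, 0)).1 - (v2.getD i (0, 0)).1)
        + ((v1.getD i (0, 0)).2 - (v2.getD i (0, 0)).2) * ((v1.getD i (0, 0)).2 - (v2.getD i (0, 0)).2), cont.2))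
      = (fun (c : Int × Int) (i : Nat) => (c.1 + pvSq v1 v2 i, c.2)) := by
    funext c i; simp [pvSq, add_assoc]
  rw [h, pair_foldl]

theorem a_char (v1 v2 : List (Int × Int)) :
    ditancia_Vectores v1 v2 =
      (((List.range v1.length).map (pvSq v1 v2)).foldl (· + ·) 0, 0) := by
  unfold ditancia_Vectores matrizConjugada2
  simp only [PySem.List.foldl_append_singleton_eq_map, List.nil_append,
    List.length_map, List.length_range]
  rw [List.map_congr_left (f := fun j =>
        multiComplejos
          ((((List.range v1.length).map (fun i =>
              [((((List.range v1.length).map (fun i => restaComplejos (v1.getD i (0,0)) (v2.getD i (0,0)))).getD i (0,0)).1,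
                (((List.range v1.length).map (fun i => restaComplejos (v1.getD i (0,0)) (v2.getD i (0,0)))).getD i (0,0)).2 * -1)])).getD j []).getD 0 (0,0))
          (((List.range v1.length).map (fun i => restaComplejos (v1.getD i (0,0)) (v2.getD i (0,0)))).getD j (0,0)))
      (g := fun j => ((pvSq v1 v2 j : Int), (0 : Int)))
      (fun j hj => by
        have hjn : j < v1.length := List.mem_range.mp hj
        simp only [PySem.List.getD_map_range _ _ _ _ hjn]
        simp only [List.getD_cons_zero]
        simp only [multiComplejos, restaComplejos, pvSq]
        exact Prod.ext (by ring) (by ring))]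
  rw [List.foldl_map]
  have h : (fun (c : Int × Int) (j : Nat) => sumComplejos c (pvSq v1 v2 j, 0))
      = (fun (c : Int × Int) (j : Nat) => (c.1 + pvSq v1 v2 j, c.2)) := by
    funext c j; simp [sumComplejos]
  rw [h, pair_foldl]

-- ===== VERDICT (by name: the statement is the Claim_ definition above) =====
theorem ditancia_Vectores_spec : Claim_equal_ditancia_Vectores := by
  intro v1 v2 _ _
  unfold Spec_ditancia_Vectores
  rw [a_char, alt_char]
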